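-- pv_equiv track=rewrite | github.com/cmm2209/VW-XSD | text_replacements.py | apply_replacements_with_mapping
-- ===== SOURCE A (Python) =====
-- def apply_replacements_with_mapping(text, replacements):
--     pairs = sorted(replacements.items(), key=lambda x: len(x[0]), reverse=True)
--
--     chars = [(ch, i) for i, ch in enumerate(text)]
--
--     for old, new in pairs:  # iterate over pairs, not replacements directly
--         old_len = len(old)
--         i = 0
--         new_chars = []
--         while i < len(chars):
--             segment = ''.join(c for c, _ in chars[i:i+old_len])
--             if segment == old:
--                 original_pos = chars[i][1]
--                 for new_ch in new:
--                     new_chars.append((new_ch, original_pos))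
--                 i += old_len
--             else:
--                 new_chars.append(chars[i])
--                 i += 1
--         chars = new_chars
--
--     replaced_text = ''.join(c for c, _ in chars)
--     mapping = [pos for _, pos in chars]
--     return replaced_text, mapping
-- ===== SOURCE B (Python) =====
-- def apply_replacements_with_mapping(text, replacements):
--     pairs = sorted(replacements.items(), key=lambda x: len(x[0]), reverse=True)
--
--     positions = list(range(len(text)))
--
--     for old, new in pairs:
--         old_len = len(old)
--         new_len = len(new)
--         out_parts = []
--         out_pos = []
--         rest = text
--         rpos = positions
--         while True:
--             j = rest.find(old)
--             if j == -1:
--                 out_parts.append(rest)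
--                 out_pos.extend(rpos)
--                 break
--             out_parts.append(rest[:j])
--             out_parts.append(new)
--             out_pos.extend(rpos[:j])
--             out_pos.extend([rpos[j]] * new_len)
--             rest = rest[j + old_len:]
--             rpos = rpos[j + old_len:]
--         text = ''.join(out_parts)
--         positions = out_pos
--
--     return text, positions
-- ===== Notes on version B (the rewrite author's own statement) =====
-- stated objective: faster
-- what changed: Instead of rebuilding a per-character (char, origin) pair list and re-joining an old_len slice at every position, B keeps the text as a plain string with a parallel positions list and, per pattern, jumps between matches with str.find, bulk-copying the gap slices and emitting the replacement with the match-start position.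
-- outside the precondition, e.g. on apply_replacements_with_mapping('', {'': 'x'}): A returns ('', []), B raises IndexError
import Mathlib
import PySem

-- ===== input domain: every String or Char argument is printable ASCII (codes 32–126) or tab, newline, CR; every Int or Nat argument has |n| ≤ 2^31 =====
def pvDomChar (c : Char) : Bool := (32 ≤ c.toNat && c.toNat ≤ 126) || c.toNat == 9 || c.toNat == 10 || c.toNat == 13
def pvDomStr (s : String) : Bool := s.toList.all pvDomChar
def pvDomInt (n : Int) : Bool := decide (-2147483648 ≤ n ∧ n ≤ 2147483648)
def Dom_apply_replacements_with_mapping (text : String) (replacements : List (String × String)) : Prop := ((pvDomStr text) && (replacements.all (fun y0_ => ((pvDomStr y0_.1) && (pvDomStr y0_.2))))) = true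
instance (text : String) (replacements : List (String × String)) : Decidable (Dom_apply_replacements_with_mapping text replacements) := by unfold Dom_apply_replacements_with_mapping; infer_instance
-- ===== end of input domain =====

-- B keeps the text as a plain char list with a parallel positions list and, per pattern, jumps
-- between matches with find, bulk-copying the gap slices, instead of A's per-position segment
-- re-join over a (char, origin) pair list.

-- ===== PORT A =====
-- A's inner while loop over chars[i:], one fuel unit per iteration (Python diverges when old = '',
-- which Pre_ excludes; the fuel is never exhausted for old ≠ '').
def paLoop : Nat → List Char → List Char → List (Char × Int) → List (Char × Int)
  | 0, _, _, _ => []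
  | fuel + 1, old, new, cs =>
    match cs with
    | [] => []
    | c :: rest =>
      if ((c :: rest).take old.length).map Prod.fst = old then
        new.map (fun ch => (ch, c.2)) ++ paLoop fuel old new ((c :: rest).drop old.length)
      else
        c :: paLoop fuel old new rest

def apply_replacements_with_mapping (text : String) (replacements : List (String × String)) : String × List Int :=
  let pairs := PySem.List.sorted (PySem.Dict.ofList replacements).items (fun x => PySem.Str.len x.1) true
  let chars := (PySem.List.enumerate text.toList 0).map (fun p => (p.2, p.1))
  let finalChars := pairs.foldl (fun chars pr => paLoop (chars.length + 1) pr.1.toList pr.2.toList chars) chars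
  (String.ofList (finalChars.map Prod.fst), finalChars.map Prod.snd)

-- ===== PORT B =====
-- Source B's inner while loop: accumulate parts/positions, find the next match, bulk-copy the gap.
-- One fuel unit per iteration (cannot run out for old ≠ '', the only case Python B terminates on).
def pbLoop : Nat → List Char → List Char → List Char → List Int → List (List Char) → List Int → List (List Char) × List Int
  | 0, _, _, _, _, outT, outP => (outT, outP)
  | fuel + 1, old, new, rest, rpos, outT, outP =>
    let j := PySem.Chars.find rest old
    if j = -1 then (outT ++ [rest], outP ++ rpos)
    else
      let jn := j.toNat
      pbLoop fuel old new (rest.drop (jn + old.length)) (rpos.drop (jn + old.length))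
        (outT ++ [rest.take jn, new])
        (outP ++ rpos.take jn ++ List.replicate new.length (rpos.getD jn 0))

def apply_replacements_with_mapping_alt (text : String) (replacements : List (String × String)) : String × List Int :=
  let pairs := PySem.List.sorted (PySem.Dict.ofList replacements).items (fun x => PySem.Str.len x.1) true
  let st := pairs.foldl
    (fun st pr =>
      let r := pbLoop (st.1.length + 1) pr.1.toList pr.2.toList st.1 st.2 [] []
      (PySem.Chars.join [] r.1, r.2))
    (text.toList, PySem.List.pyRange 0 (text.toList.length : Int) 1)
  (String.ofList st.1, st.2)

-- ===== PRECONDITION & SPEC =====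
-- Pre_ excludes replacement dicts containing an empty key: on those Python A diverges whenever the
-- text reaching that pass is nonempty, and Python B diverges (nonempty text) or raises IndexError
-- (empty text, where A still returns); see claim cites.
def Pre_apply_replacements_with_mapping (text : String) (replacements : List (String × String)) : Prop :=
  ∀ pr ∈ replacements, pr.1 ≠ ""
instance (text : String) (replacements : List (String × String)) : Decidable (Pre_apply_replacements_with_mapping text replacements) := by unfold Pre_apply_replacements_with_mapping; infer_instance

def pvWitness_apply_replacements_with_mapping : String × (List (String × String)) :=
  ("abcab c", [("ab", "xyz"), ("c", "q")])

def Spec_apply_replacements_with_mapping (text : String) (replacements : List (String × String)) (out : String × List Int) : Prop := out = apply_replacements_with_mapping_alt text replacements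
instance (text : String) (replacements : List (String × String)) (out : String × List Int) : Decidable (Spec_apply_replacements_with_mapping text replacements out) := by unfold Spec_apply_replacements_with_mapping; infer_instance

-- ===== CLAIM (what is proved, stated in full; the proofs are below) =====
def Claim_equal_apply_replacements_with_mapping : Prop := ∀ (text : String) (replacements : List (String × String)), Dom_apply_replacements_with_mapping text replacements → Pre_apply_replacements_with_mapping text replacements → Spec_apply_replacements_with_mapping text replacements (apply_replacements_with_mapping text replacements)

-- ===== LEMMAS AND PROOFS =====

-- ''.join with empty separator is flatten.
lemma pvJoinNilSep : ∀ (l : List (List Char)), PySem.Chars.join [] l = l.flatten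
  | [] => rfl
  | [a] => by simp [PySem.Chars.join, List.intercalate]
  | a :: b :: t => by
    have ih := pvJoinNilSep (b :: t)
    simp only [PySem.Chars.join, List.intercalate] at ih ⊢
    simp [List.intersperse, ih]

-- items of dict(replacements) only carry keys present in the input list.
lemma pvMemItemsFoldl (l : List (String × String)) :
    ∀ (d : PySem.Dict String String) (p : String × String),
      p ∈ (l.foldl (fun d q => d.insert q.1 q.2) d).items → p ∈ d.items ∨ p.1 ∈ l.map Prod.fst := by
  induction l with
  | nil => intro d p h; exact Or.inl h
  | cons q t ih =>
    intro d p h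
    rcases ih (d.insert q.1 q.2) p h with h' | h'
    · rcases (PySem.Dict.mem_items_insert d q.1 q.2 p).mp h' with h'' | h''
      · right; simp [h'']
      · exact Or.inl h''.1
    · right; simp [h', List.map_cons]

-- A's pass copies the whole list when the pattern occurs nowhere.
lemma pvPaNoOcc (old new : List Char) :
    ∀ (cs : List (Char × Int)) (fuel : Nat), cs.length ≤ fuel →
      (∀ i, ¬ old <+: (cs.map Prod.fst).drop i) → paLoop fuel old new cs = cs := by
  intro cs
  induction cs with
  | nil => intro fuel _ _; cases fuel <;> rfl
  | cons c rest ih =>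
    intro fuel hf h
    obtain ⟨f, rfl⟩ : ∃ f, fuel = f + 1 := by
      cases fuel with
      | zero => simp at hf
      | succ f => exact ⟨f, rfl⟩
    have hcond : ¬ (((c :: rest).take old.length).map Prod.fst = old) := by
      intro heq
      apply h 0
      rw [List.drop_zero, List.prefix_iff_eq_take, ← List.map_take]
      exact heq.symm
    simp only [paLoop, if_neg hcond]
    congr 1
    apply ih f (by simpa using hf)
    intro i
    have := h (i + 1)
    simpa [List.drop_succ_cons] using this

-- A's pass up to and through the FIRST match: copy jn chars, emit the replacement, recurse.
lemma pvPaSkip (old new : List Char) (hold : old ≠ []) :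
    ∀ (jn : Nat) (cs : List (Char × Int)) (fuel : Nat), jn + 1 ≤ fuel →
      old <+: (cs.map Prod.fst).drop jn →
      (∀ i, i < jn → ¬ old <+: (cs.map Prod.fst).drop i) →
      paLoop fuel old new cs =
        cs.take jn ++ new.map (fun ch => (ch, (cs.map Prod.snd).getD jn 0))
          ++ paLoop (fuel - (jn + 1)) old new (cs.drop (jn + old.length)) := by
  intro jn
  induction jn with
  | zero =>
    intro cs fuel hfuel hpre _
    cases cs with
    | nil => exact absurd (List.prefix_nil.mp (by simpa using hpre)) hold
    | cons c rest =>
      obtain ⟨f, rfl⟩ : ∃ f, fuel = f + 1 := by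
        cases fuel with
        | zero => omega
        | succ f => exact ⟨f, rfl⟩
      have hcond : ((c :: rest).take old.length).map Prod.fst = old := by
        rw [List.map_take]
        exact (List.prefix_iff_eq_take.mp (by simpa using hpre)).symm
      have hunf : paLoop (f + 1) old new (c :: rest)
          = if ((c :: rest).take old.length).map Prod.fst = old then
              new.map (fun ch => (ch, c.2)) ++ paLoop f old new ((c :: rest).drop old.length)
            else c :: paLoop f old new rest := rfl
      rw [hunf, if_pos hcond]
      simp
  | succ jn ih =>
    intro cs fuel hfuel hpre h
    cases cs with
    | nil => exact absurd (List.prefix_nil.mp (by simpa using hpre)) hold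
    | cons c rest =>
      obtain ⟨f, rfl⟩ : ∃ f, fuel = f + 1 := by
        cases fuel with
        | zero => omega
        | succ f => exact ⟨f, rfl⟩
      have hcond : ¬ (((c :: rest).take old.length).map Prod.fst = old) := by
        intro heq
        apply h 0 (by omega)
        rw [List.drop_zero, List.prefix_iff_eq_take, ← List.map_take]
        exact heq.symm
      have hunf : paLoop (f + 1) old new (c :: rest)
          = if ((c :: rest).take old.length).map Prod.fst = old then
              new.map (fun ch => (ch, c.2)) ++ paLoop f old new ((c :: rest).drop old.length)
            else c :: paLoop f old new rest := rfl
      rw [hunf, if_neg hcond]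
      rw [ih rest f (by omega) (by simpa [List.drop_succ_cons] using hpre)
            (by intro i hi; have := h (i + 1) (by omega); simpa [List.drop_succ_cons] using this)]
      have h1 : f + 1 - (jn + 1 + 1) = f - (jn + 1) := by omega
      have h2 : jn + 1 + old.length = (jn + old.length) + 1 := by omega
      simp [h1, h2, List.getD_cons_succ]

-- Core correspondence of one pass: B's find/bulk-copy loop computes the unzip of A's pass.
lemma pvMain (old new : List Char) (hold : old ≠ []) :
    ∀ (n : Nat) (cs : List (Char × Int)) (fa fb : Nat) (outT : List (List Char)) (outP : List Int),
      cs.length ≤ n → cs.length ≤ fa → cs.length < fb →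
      (pbLoop fb old new (cs.map Prod.fst) (cs.map Prod.snd) outT outP).1.flatten
          = outT.flatten ++ (paLoop fa old new cs).map Prod.fst
      ∧ (pbLoop fb old new (cs.map Prod.fst) (cs.map Prod.snd) outT outP).2
          = outP ++ (paLoop fa old new cs).map Prod.snd := by
  intro n
  induction n using Nat.strong_induction_on with
  | _ n ihn =>
  intro cs fa fb outT outP hn hfa hfb
  obtain ⟨fb', rfl⟩ : ∃ f, fb = f + 1 := by
    cases fb with
    | zero => omega
    | succ f => exact ⟨f, rfl⟩
  by_cases hj : PySem.Chars.find (cs.map Prod.fst) old = -1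
  · have hno : ∀ i, ¬ old <+: (cs.map Prod.fst).drop i := by
      intro i hpre
      have hin : PySem.Chars.isIn old (cs.map Prod.fst) = true :=
        (PySem.Chars.exists_prefix_drop_iff_isIn _ _).mp ⟨i, hpre⟩
      exact ((PySem.Chars.find_eq_neg_one_iff _ _).mp hj)
        ((PySem.Chars.isIn_iff_infix _ _).mp hin)
    rw [pvPaNoOcc old new cs fa hfa hno]
    simp [pbLoop, hj]
  · have hj0 : 0 ≤ PySem.Chars.find (cs.map Prod.fst) old := by
      have := PySem.Chars.neg_one_le_find (cs.map Prod.fst) old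
      omega
    obtain ⟨hpre, hmin⟩ := PySem.Chars.find_spec hj0
    have holdlen : 0 < old.length := List.length_pos_iff.mpr hold
    have hjn : (PySem.Chars.find (cs.map Prod.fst) old).toNat < cs.length := by
      by_contra hge
      push_neg at hge
      have hnil : (cs.map Prod.fst).drop (PySem.Chars.find (cs.map Prod.fst) old).toNat = [] := by
        apply List.drop_eq_nil_of_le
        simpa using hge
      rw [hnil] at hpre
      exact hold (List.prefix_nil.mp hpre)
    rw [pvPaSkip old new hold (PySem.Chars.find (cs.map Prod.fst) old).toNat cs fa (by omega) hpre hmin]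
    simp only [pbLoop, if_neg hj]
    set jn := (PySem.Chars.find (cs.map Prod.fst) old).toNat with hjndef
    have hdrop1 : (cs.map Prod.fst).drop (jn + old.length) = (cs.drop (jn + old.length)).map Prod.fst := by
      rw [List.map_drop]
    have hdrop2 : (cs.map Prod.snd).drop (jn + old.length) = (cs.drop (jn + old.length)).map Prod.snd := by
      rw [List.map_drop]
    rw [hdrop1, hdrop2]
    have hlen : (cs.drop (jn + old.length)).length = cs.length - (jn + old.length) := List.length_drop
    have ih := ihn (n - 1) (by omega) (cs.drop (jn + old.length)) (fa - (jn + 1)) fb'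
      (outT ++ [(cs.map Prod.fst).take jn, new])
      (outP ++ (cs.map Prod.snd).take jn ++ List.replicate new.length ((cs.map Prod.snd).getD jn 0))
      (by omega) (by omega) (by omega)
    refine ⟨?_, ?_⟩
    · rw [ih.1]
      simp [List.map_take, List.map_map, Function.comp_def, List.append_assoc]
    · rw [ih.2]
      simp [List.map_take, List.map_map, Function.comp_def, List.map_const', List.append_assoc]

-- The outer fold preserves "B's state is the unzip of A's state".
lemma pvOuter (pairs : List (String × String)) :
    ∀ (cs : List (Char × Int)), (∀ pr ∈ pairs, pr.1 ≠ "") →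
      pairs.foldl
        (fun st pr =>
          let r := pbLoop (st.1.length + 1) pr.1.toList pr.2.toList st.1 st.2 [] []
          (PySem.Chars.join [] r.1, r.2)) (cs.map Prod.fst, cs.map Prod.snd)
      = ((pairs.foldl (fun chars pr => paLoop (chars.length + 1) pr.1.toList pr.2.toList chars) cs).map Prod.fst,
         (pairs.foldl (fun chars pr => paLoop (chars.length + 1) pr.1.toList pr.2.toList chars) cs).map Prod.snd) := by
  induction pairs with
  | nil => intro cs _; rfl
  | cons pr t ih =>
    intro cs h
    have hold : pr.1.toList ≠ [] := by
      intro h'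
      apply h pr (by simp)
      have := congrArg String.ofList h'
      simpa using this
    have hm := pvMain pr.1.toList pr.2.toList hold cs.length cs (cs.length + 1)
      ((cs.map Prod.fst).length + 1) [] [] le_rfl (by omega) (by simp)
    simp only [List.foldl_cons]
    have hstep :
        (let r := pbLoop ((cs.map Prod.fst).length + 1) pr.1.toList pr.2.toList (cs.map Prod.fst) (cs.map Prod.snd) [] []
         (PySem.Chars.join [] r.1, r.2))
        = ((paLoop (cs.length + 1) pr.1.toList pr.2.toList cs).map Prod.fst,
           (paLoop (cs.length + 1) pr.1.toList pr.2.toList cs).map Prod.snd) := by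
      show (PySem.Chars.join [] (pbLoop ((cs.map Prod.fst).length + 1) pr.1.toList pr.2.toList (cs.map Prod.fst) (cs.map Prod.snd) [] []).1,
            (pbLoop ((cs.map Prod.fst).length + 1) pr.1.toList pr.2.toList (cs.map Prod.fst) (cs.map Prod.snd) [] []).2) = _
      refine Prod.ext ?_ ?_
      · rw [pvJoinNilSep]
        simpa using hm.1
      · simpa using hm.2
    rw [hstep]
    exact ih _ (fun q hq => h q (by simp [hq]))

-- ===== VERDICT (by name: the statement is the Claim_ definition above) =====
theorem apply_replacements_with_mapping_spec : Claim_equal_apply_replacements_with_mapping := by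
  intro text replacements _ hpre
  unfold Spec_apply_replacements_with_mapping
  unfold apply_replacements_with_mapping apply_replacements_with_mapping_alt
  simp only []
  have hkeys : ∀ pr ∈ PySem.List.sorted (PySem.Dict.ofList replacements).items
      (fun x => PySem.Str.len x.1) true, pr.1 ≠ "" := by
    intro pr hm
    have h2 : pr ∈ (PySem.Dict.ofList replacements).items :=
      (PySem.List.mem_sorted _ _ _ _).mp hm
    have h3 := pvMemItemsFoldl replacements PySem.Dict.empty pr h2
    rcases h3 with h3 | h3
    · simp [PySem.Dict.empty] at h3
    · rcases List.mem_map.mp h3 with ⟨q, hq, hq1⟩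
      rw [← hq1]
      exact hpre q hq
  have hinit : (text.toList, PySem.List.pyRange 0 (text.toList.length : Int) 1)
      = (((PySem.List.enumerate text.toList 0).map (fun p => (p.2, p.1))).map Prod.fst,
         ((PySem.List.enumerate text.toList 0).map (fun p => (p.2, p.1))).map Prod.snd) := by
    refine Prod.ext ?_ ?_
    · simp only [List.map_map, Function.comp_def]
      exact (PySem.List.map_snd_enumerate text.toList 0).symm
    · simp only [List.map_map, Function.comp_def]
      have h4 := PySem.List.map_fst_enumerate text.toList 0
      simp at h4
      simpa using h4.symm
  rw [hinit, pvOuter _ _ hkeys]
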